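-- pv_equiv track=rewrite | github.com/JacobHoukes/gin-rummy | game.py | is_valid_run
-- ===== SOURCE A (Python) =====
-- RANKS = ["A", "2", "3", "4", "5", "6", "7", "8", "9", "10", "J", "Q", "K"]
--
-- def card_rank_index(card):
--     """This function returns the rank index (0-12) of a card for sorting and run detection."""
--     return RANKS.index(card[:-1])
--
-- def card_suit(card):
--     """This function returns the suit character of a card."""
--     return card[-1]
--
-- def is_valid_run(cards):
--     """This function checks whether a list of cards forms a valid run: 3 or more consecutive cards of the same suit. Aces are low only."""
--     if len(cards) < 3:
--         return False
--     suits = [card_suit(c) for c in cards]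
--     if len(set(suits)) != 1:
--         return False
--     indices = sorted([card_rank_index(c) for c in cards])
--     return indices == list(range(indices[0], indices[0] + len(indices)))
-- ===== SOURCE B (Python) =====
-- RANKS = ["A", "2", "3", "4", "5", "6", "7", "8", "9", "10", "J", "Q", "K"]
--
-- def is_valid_run(cards):
--     """Valid run: 3+ cards, one suit, distinct consecutive ranks (aces low).
--     Instead of sorting and comparing to a range, check no duplicate rank and
--     that max-min+1 equals the count (a contiguous block)."""
--     if len(cards) < 3:
--         return False
--     if len({c[-1] for c in cards}) != 1:
--         return False
--     idx = [RANKS.index(c[:-1]) for c in cards]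
--     return len(set(idx)) == len(idx) and max(idx) - min(idx) + 1 == len(idx)
-- ===== Notes on version B (the rewrite author's own statement) =====
-- stated objective: alternative
-- what changed: Replaces A's sort-then-compare-to-range check by a sort-free test: no duplicate rank indices (set size) and max-min+1 equals the count.
import Mathlib
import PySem

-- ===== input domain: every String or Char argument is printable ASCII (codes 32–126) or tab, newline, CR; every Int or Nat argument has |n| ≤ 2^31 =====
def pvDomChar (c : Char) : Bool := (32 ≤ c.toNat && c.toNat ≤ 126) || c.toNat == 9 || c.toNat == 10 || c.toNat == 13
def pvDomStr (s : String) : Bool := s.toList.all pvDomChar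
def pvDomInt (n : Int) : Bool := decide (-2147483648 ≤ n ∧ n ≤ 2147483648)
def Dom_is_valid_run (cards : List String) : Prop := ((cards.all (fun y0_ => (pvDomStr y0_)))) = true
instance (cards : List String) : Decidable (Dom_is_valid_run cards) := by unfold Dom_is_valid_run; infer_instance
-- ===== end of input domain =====

-- B replaces A's sort-and-compare-to-range by a sort-free check: distinct rank
-- indices (set size) and max-min+1 = count; equivalence proved on all inputs where A returns.

-- ===== PORT A =====
def pvRANKS : List (List Char) :=
  [['A'], ['2'], ['3'], ['4'], ['5'], ['6'], ['7'], ['8'], ['9'], ['1','0'], ['J'], ['Q'], ['K']]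

-- RANKS.index(card[:-1]); .getD 0 is only reached outside Pre_ (Python raises ValueError there)
def card_rank_index (card : List Char) : Int :=
  (PySem.List.index? pvRANKS (PySem.List.slice card none (some (-1)))).getD 0

-- card[-1]; .getD ' ' only reached outside Pre_ (Python raises IndexError there)
def card_suit (card : List Char) : Char :=
  (PySem.List.pyGet? card (-1)).getD ' '

def is_valid_run (cards : List String) : Bool :=
  if cards.length < 3 then false
  else
    let suits := cards.map (fun c => card_suit c.toList)
    if (PySem.Set.ofList suits).length ≠ 1 then false
    else
      let indices := PySem.List.sorted (cards.map (fun c => card_rank_index c.toList)) (fun x => x) false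
      decide (indices = PySem.List.pyRange (PySem.List.pyGetD indices 0 0)
                          (PySem.List.pyGetD indices 0 0 + (indices.length : Int)) 1)

-- ===== PORT B =====
def is_valid_run_alt (cards : List String) : Bool :=
  if cards.length < 3 then false
  else if (PySem.Set.ofList (cards.map (fun c => (PySem.List.pyGet? c.toList (-1)).getD ' '))).length ≠ 1 then false
  else
    let idx : List Int := cards.map (fun c => ((PySem.List.index? pvRANKS c.toList.dropLast).getD 0 : Int))
    (decide ((PySem.Set.ofList idx).length = idx.length)) &&
      (decide ((PySem.List.max? idx (fun x => x)).getD 0 - (PySem.List.min? idx (fun x => x)).getD 0 + 1 = (idx.length : Int)))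

-- ===== PRECONDITION & SPEC =====
-- Pre_ excludes exactly the inputs where Python A raises: with ≥ 3 cards, an empty card
-- string (IndexError from card[-1]), or all suits equal but some rank not in RANKS
-- (ValueError from RANKS.index).  A returns on every input admitted here.
def Pre_is_valid_run (cards : List String) : Prop :=
  cards.length < 3 ∨
    ((∀ c ∈ cards, c.toList ≠ []) ∧
      ((∃ c ∈ cards, ∃ d ∈ cards, c.toList.getLast? ≠ d.toList.getLast?) ∨
        ∀ c ∈ cards, c.toList.dropLast ∈ pvRANKS))
instance (cards : List String) : Decidable (Pre_is_valid_run cards) := by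
  unfold Pre_is_valid_run; infer_instance

def pvWitness_is_valid_run : List String := ["AH", "2H", "3H"]

def Spec_is_valid_run (cards : List String) (out : Bool) : Prop := out = is_valid_run_alt cards
instance (cards : List String) (out : Bool) : Decidable (Spec_is_valid_run cards out) := by unfold Spec_is_valid_run; infer_instance

-- ===== CLAIM (what is proved, stated in full; the proofs are below) =====
def Claim_equal_is_valid_run : Prop := ∀ (cards : List String), Dom_is_valid_run cards → Pre_is_valid_run cards → Spec_is_valid_run cards (is_valid_run cards)

-- ===== LEMMAS AND PROOFS =====

theorem pv_foldl_add_append (l acc : List Int) :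
    ∃ u, List.foldl PySem.Set.add acc l = acc ++ u ∧ u.Sublist l := by
  induction l generalizing acc with
  | nil => exact ⟨[], by simp⟩
  | cons x xs ih =>
    simp only [List.foldl_cons]
    by_cases hc : x ∈ acc
    · obtain ⟨u, hu, hsub⟩ := ih acc
      exact ⟨u, by simpa [PySem.Set.add, hc] using hu, hsub.cons _⟩
    · obtain ⟨u, hu, hsub⟩ := ih (acc ++ [x])
      exact ⟨x :: u, by simpa [PySem.Set.add, hc] using hu, hsub.cons₂ _⟩

theorem pv_ofList_len_iff (l : List Int) :
    (PySem.Set.ofList l).length = l.length ↔ l.Nodup := by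
  constructor
  · intro h
    obtain ⟨u, hu, hsub⟩ := pv_foldl_add_append l []
    have he : PySem.Set.ofList l = u := by simpa [PySem.Set.ofList] using hu
    have : PySem.Set.ofList l = l := by
      rw [he] at h ⊢
      exact hsub.eq_of_length h
    rw [← this]; exact PySem.Set.nodup_ofList l
  · intro h
    exact (List.perm_of_nodup_nodup_toFinset_eq (PySem.Set.nodup_ofList l) h
      (by ext y; simp [List.mem_toFinset, PySem.Set.mem_ofList])).length_eq

theorem is_valid_run_core (l : List Int) (hne : l ≠ []) :
    (decide (PySem.List.sorted l (fun x => x) false =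
        PySem.List.pyRange (PySem.List.pyGetD (PySem.List.sorted l (fun x => x) false) 0 0)
          (PySem.List.pyGetD (PySem.List.sorted l (fun x => x) false) 0 0 +
            ((PySem.List.sorted l (fun x => x) false).length : Int)) 1))
    = ((decide ((PySem.Set.ofList l).length = l.length)) &&
        (decide ((PySem.List.max? l (fun x => x)).getD 0 - (PySem.List.min? l (fun x => x)).getD 0 + 1 = (l.length : Int)))) := by
  rw [← Bool.decide_and, decide_eq_decide]
  set s := PySem.List.sorted l (fun x => x) false with hsdef
  have hlen : (s.length : Int) = (l.length : Int) := by
    exact_mod_cast congrArg Nat.cast (PySem.List.length_sorted l (fun x => x) false)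
  have hperm : s.Perm l := PySem.List.sorted_perm l (fun x => x) false
  have hsne : s ≠ [] := by
    rw [hsdef, Ne, PySem.List.sorted_eq_nil_iff]; exact hne
  obtain ⟨a, t, hst⟩ := List.exists_cons_of_ne_nil hsne
  have hget : PySem.List.pyGetD s 0 0 = a := by
    rw [hst]; simp [PySem.List.pyGetD, PySem.List.pyIdx?, PySem.List.pyGet?]
  have hn1 : 1 ≤ (l.length : Int) := by
    have := List.length_pos_of_ne_nil hne; omega
  cases hmx : PySem.List.max? l (fun x => x) with
  | none => exact absurd ((PySem.List.max?_eq_none_iff l _).mp hmx) hne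
  | some M =>
  cases hmn : PySem.List.min? l (fun x => x) with
  | none => exact absurd ((PySem.List.min?_eq_none_iff l _).mp hmn) hne
  | some m =>
  have hub : ∀ y ∈ l, y ≤ M := PySem.List.max?_isMax hmx
  have hlb : ∀ y ∈ l, m ≤ y := PySem.List.min?_isMin hmn
  have hMmem : M ∈ l := PySem.List.max?_mem hmx
  have hmmem : m ∈ l := PySem.List.min?_mem hmn
  rw [hget, hlen]
  simp only [Option.getD_some]
  constructor
  · intro hP
    have hmem : ∀ y, y ∈ l ↔ (a ≤ y ∧ y < a + (l.length : Int)) := by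
      intro y; rw [← hperm.mem_iff, hP, PySem.List.mem_pyRange_one]
    have hnd : l.Nodup := hperm.nodup_iff.mp (hP ▸ PySem.List.nodup_pyRange_one _ _)
    refine ⟨(pv_ofList_len_iff l).mpr hnd, ?_⟩
    have h1 : a + (l.length : Int) - 1 ∈ l := (hmem _).mpr (by omega)
    have h2 : M ≤ a + (l.length : Int) - 1 := by have := (hmem M).mp hMmem; omega
    have h3 : a ∈ l := (hmem a).mpr (by omega)
    have h4 := hub _ h1
    have h5 := hlb _ h3
    have h6 := (hmem m).mp hmmem
    omega
  · rintro ⟨hQ, hR⟩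
    have hnd : l.Nodup := (pv_ofList_len_iff l).mp hQ
    have hsub : l.toFinset ⊆ Finset.Icc m M := by
      intro y hy
      rw [List.mem_toFinset] at hy
      exact Finset.mem_Icc.mpr ⟨hlb _ hy, hub _ hy⟩
    have hcard : (Finset.Icc m M).card = l.toFinset.card := by
      rw [Int.card_Icc, List.toFinset_card_of_nodup hnd]
      omega
    have hfs : l.toFinset = Finset.Icc m M :=
      Finset.eq_of_subset_of_card_le hsub (le_of_eq hcard)
    have hperm2 : l.Perm (PySem.List.pyRange m (m + (l.length : Int)) 1) := by
      apply List.perm_of_nodup_nodup_toFinset_eq hnd (PySem.List.nodup_pyRange_one _ _)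
      rw [hfs]
      ext y
      rw [List.mem_toFinset, PySem.List.mem_pyRange_one, Finset.mem_Icc]
      omega
    have hs2 : s = PySem.List.pyRange m (m + (l.length : Int)) 1 :=
      PySem.List.sorted_eq_of_perm_of_pairwise_lt l _ (fun x => x) hperm2.symm
        (PySem.List.pairwise_lt_pyRange_one _ _)
    have ham : a = m := by
      have := hs2
      rw [hst, PySem.List.pyRange_one_cons (by omega : m < m + (l.length : Int))] at this
      exact (List.cons.injEq _ _ _ _ ▸ this).1
    rw [hs2, ham]


-- ===== VERDICT (by name: the statement is the Claim_ definition above) =====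
theorem is_valid_run_spec : Claim_equal_is_valid_run := by
  intro cards _ _
  unfold Spec_is_valid_run
  simp only [is_valid_run, is_valid_run_alt, card_suit, card_rank_index,
    PySem.List.slice_to_neg_one]
  by_cases h3 : cards.length < 3
  · simp [h3]
  · have hne : cards ≠ [] := by
      intro h; subst h; simp at h3
    by_cases hsuit : (PySem.Set.ofList (cards.map fun c => (PySem.List.pyGet? c.toList (-1)).getD ' ')).length ≠ 1
    · simp [h3, hsuit]
    · simp only [h3, hsuit, if_false]
      exact (is_valid_run_core (cards.map fun c => ((PySem.List.index? pvRANKS c.toList.dropLast).getD 0 : Int))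
        (fun h => hne (List.map_eq_nil_iff.mp h)))
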